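-- pv_equiv track=rewrite | github.com/TheNitromeFan/counting | HoC.py | get_rankings_for_tuples
-- ===== SOURCE A (Python) =====
-- import itertools
--
-- def get_rankings_for_tuples(sorted_tuples):
--     rankings = []
--     rank = 1
--     for _, tuples in itertools.groupby(sorted_tuples, lambda kv: kv[1]):
--         group = [(rank, tuple_uc[0], tuple_uc[1]) for tuple_uc in tuples]
--         group.sort(key=lambda x: x[1].lower())
--         rankings += group
--         rank += len(group)
--     return rankings
-- ===== SOURCE B (Python) =====
-- def get_rankings_for_tuples(sorted_tuples):
--     annotated = []
--     rank = 0
--     prev = None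
--     for name, cnt in sorted_tuples:
--         if cnt != prev:
--             rank = len(annotated) + 1
--             prev = cnt
--         annotated.append((rank, name, cnt))
--     annotated.sort(key=lambda t: (t[0], t[1].lower()))
--     return annotated
-- ===== Notes on version B (the rewrite author's own statement) =====
-- stated objective: alternative
-- what changed: Replaces groupby with per-group sorts and a running rank counter by a single pass that annotates each tuple with its group's rank (position of the group's first element + 1, reset whenever the count changes) followed by ONE global stable sort on the composite key (rank, name.lower()).
import Mathlib
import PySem

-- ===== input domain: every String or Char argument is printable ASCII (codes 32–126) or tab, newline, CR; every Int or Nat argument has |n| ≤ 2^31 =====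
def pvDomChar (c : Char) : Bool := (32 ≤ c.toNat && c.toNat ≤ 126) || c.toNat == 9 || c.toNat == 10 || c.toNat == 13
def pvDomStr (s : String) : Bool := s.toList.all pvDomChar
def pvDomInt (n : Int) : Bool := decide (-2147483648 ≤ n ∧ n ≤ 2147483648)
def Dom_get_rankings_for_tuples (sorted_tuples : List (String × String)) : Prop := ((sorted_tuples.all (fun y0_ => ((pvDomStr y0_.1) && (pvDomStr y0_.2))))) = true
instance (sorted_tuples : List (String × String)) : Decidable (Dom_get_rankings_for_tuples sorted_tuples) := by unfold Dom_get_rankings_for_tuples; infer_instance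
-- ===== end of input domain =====

-- B replaces A's groupby-with-per-group-sorts by a single annotate pass plus ONE global
-- stable sort on the composite key (rank, name.lower()); same return value, alternative algorithm.

-- ===== PORT A =====
-- itertools.groupby(sorted_tuples, lambda kv: kv[1]) yields maximal consecutive runs of
-- equal second components; pvRuns is that grouping (groups as lists, keys dropped).
def pvRuns : List (String × String) → List (List (String × String))
  | [] => []
  | x :: xs =>
    (x :: xs.takeWhile (fun y => y.2 == x.2)) :: pvRuns (xs.dropWhile (fun y => y.2 == x.2))
termination_by l => l.length
decreasing_by
  simpa using Nat.lt_succ_of_le (List.length_dropWhile_le _ _)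

def get_rankings_for_tuples (sorted_tuples : List (String × String)) : List (Int × String × String) :=
  ((pvRuns sorted_tuples).foldl
    (fun (st : List (Int × String × String) × Int) tuples =>
      let group := PySem.List.sorted (tuples.map (fun t => (st.2, t.1, t.2)))
        (fun x => PySem.Str.lower x.2.1)
      (st.1 ++ group, st.2 + group.length))
    ([], 1)).1

-- ===== PORT B =====
-- the loop body of B's annotate pass (rank resets to len(annotated)+1 when the count changes)
def pvStepB (st : List (Int × String × String) × Int × Option String) (nc : String × String) :
    List (Int × String × String) × Int × Option String :=
  if st.2.2 ≠ some nc.2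
  then (st.1 ++ [((st.1.length : Int) + 1, nc.1, nc.2)], (st.1.length : Int) + 1, some nc.2)
  else (st.1 ++ [(st.2.1, nc.1, nc.2)], st.2)

def get_rankings_for_tuples_alt (sorted_tuples : List (String × String)) : List (Int × String × String) :=
  let annotated := sorted_tuples.foldl pvStepB ([], 0, none)
  PySem.List.sorted2 annotated.1 (fun t => t.1) (fun t => PySem.Str.lower t.2.1)

-- ===== PRECONDITION & SPEC =====
def Spec_get_rankings_for_tuples (sorted_tuples : List (String × String)) (out : List (Int × String × String)) : Prop := out = get_rankings_for_tuples_alt sorted_tuples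
instance (sorted_tuples : List (String × String)) (out : List (Int × String × String)) : Decidable (Spec_get_rankings_for_tuples sorted_tuples out) := by unfold Spec_get_rankings_for_tuples; infer_instance

-- ===== CLAIM (what is proved, stated in full; the proofs are below) =====
def Claim_equal_get_rankings_for_tuples : Prop := ∀ (sorted_tuples : List (String × String)), Dom_get_rankings_for_tuples sorted_tuples → Spec_get_rankings_for_tuples sorted_tuples (get_rankings_for_tuples sorted_tuples)

-- ===== LEMMAS AND PROOFS =====

-- the composite-key "before" predicate of B's sorted2
def pvBt (a b : Int × String × String) : Bool :=
  decide (a.1 < b.1) || (!decide (b.1 < a.1) && decide (PySem.Str.lower a.2.1 < PySem.Str.lower b.2.1))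

-- middle forms: the annotated list blockwise, and A's blockwise-sorted result
def pvMid : List (List (String × String)) → Int → List (Int × String × String)
  | [], _ => []
  | g :: gs, r => g.map (fun t => (r, t.1, t.2)) ++ pvMid gs (r + g.length)

def pvAmid : List (List (String × String)) → Int → List (Int × String × String)
  | [], _ => []
  | g :: gs, r =>
      PySem.List.sorted (g.map (fun t => (r, t.1, t.2))) (fun x => PySem.Str.lower x.2.1)
        ++ pvAmid gs (r + g.length)

theorem pvInsertBy_congr {α : Type} (b1 b2 : α → α → Bool) (x : α) (ys : List α)
    (h : ∀ y ∈ ys, b1 x y = b2 x y) :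
    PySem.List.insertBy b1 x ys = PySem.List.insertBy b2 x ys := by
  induction ys with
  | nil => rfl
  | cons y ys ih =>
      simp only [PySem.List.insertBy]
      rw [h y (by simp)]
      by_cases hb : b2 x y = true
      · simp [hb]
      · simp only [Bool.not_eq_true] at hb
        simp [hb, ih (fun z hz => h z (by simp [hz]))]

theorem pvInsertBy_skip {α : Type} (before : α → α → Bool) (x : α) (pre suf : List α)
    (h : ∀ y ∈ pre, before x y = false) :
    PySem.List.insertBy before x (pre ++ suf) = pre ++ PySem.List.insertBy before x suf := by
  induction pre with
  | nil => rfl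
  | cons y ys ih =>
      simp only [List.cons_append, PySem.List.insertBy, h y (by simp)]
      simp [ih (fun z hz => h z (by simp [hz]))]

theorem pvFold_split {α : Type} (bt b2 : α → α → Bool) (block pre s : List α)
    (h1 : ∀ x ∈ block, ∀ y ∈ pre, bt x y = false)
    (h2 : ∀ x ∈ block, ∀ y, (y ∈ s ∨ y ∈ block) → bt x y = b2 x y) :
    block.foldl (fun a x => PySem.List.insertBy bt x a) (pre ++ s)
      = pre ++ block.foldl (fun a x => PySem.List.insertBy b2 x a) s := by
  induction block generalizing s with
  | nil => simp
  | cons x xs ih =>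
      simp only [List.foldl_cons]
      rw [pvInsertBy_skip bt x pre s (h1 x (by simp)),
          pvInsertBy_congr bt b2 x s (fun y hy => h2 x (by simp) y (Or.inl hy))]
      apply ih
      · intro z hz y hy
        exact h1 z (List.mem_cons_of_mem _ hz) y hy
      · intro z hz y hy
        rcases hy with hy | hy
        · rcases (PySem.List.mem_insertBy _ _ _ _).1 hy with rfl | hy
          · exact h2 z (List.mem_cons_of_mem _ hz) y (Or.inr (by simp))
          · exact h2 z (List.mem_cons_of_mem _ hz) y (Or.inl hy)
        · exact h2 z (List.mem_cons_of_mem _ hz) y (Or.inr (List.mem_cons_of_mem _ hy))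

theorem pvRuns_ne_nil : ∀ l : List (String × String), ∀ g ∈ pvRuns l, g ≠ [] := by
  intro l
  induction l using pvRuns.induct with
  | case1 => simp [pvRuns]
  | case2 x xs ih =>
      intro g hg
      rw [pvRuns] at hg
      simp only [List.mem_cons] at hg
      rcases hg with rfl | hg
      · simp
      · exact ih g hg

-- global insertion sort of pvMid equals the concatenation of per-block sorts
theorem pvSort_mid : ∀ (gs : List (List (String × String))) (r : Int)
    (pre : List (Int × String × String)),
    (∀ g ∈ gs, g ≠ []) → (∀ y ∈ pre, y.1 < r) →
    (pvMid gs r).foldl (fun a x => PySem.List.insertBy pvBt x a) pre = pre ++ pvAmid gs r := by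
  intro gs
  induction gs with
  | nil => intro r pre _ _; simp [pvMid, pvAmid]
  | cons g gs ih =>
      intro r pre hne hlt
      simp only [pvMid, pvAmid, List.foldl_append]
      have hblock : ∀ x ∈ g.map (fun t => ((r : Int), t.1, t.2)), x.1 = r := by
        intro x hx
        rcases List.mem_map.1 hx with ⟨t, _, rfl⟩
        rfl
      have hsplit := pvFold_split pvBt
        (fun a b => decide (PySem.Str.lower a.2.1 < PySem.Str.lower b.2.1))
        (g.map (fun t => ((r : Int), t.1, t.2))) pre []
        (by
          intro x hx y hy
          have hx1 := hblock x hx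
          have hy1 := hlt y hy
          simp only [pvBt]
          have h1 : ¬ x.1 < y.1 := by omega
          have h2 : y.1 < x.1 := by omega
          simp [h1, h2])
        (by
          intro x hx y hy
          have hx1 := hblock x hx
          have hy1 : y.1 = r := by
            rcases hy with hy | hy
            · simp at hy
            · exact hblock y hy
          simp only [pvBt, hx1, hy1]
          simp)
      rw [List.append_nil] at hsplit
      rw [hsplit]
      have hs : (g.map (fun t => ((r : Int), t.1, t.2))).foldl
          (fun a x => PySem.List.insertBy
            (fun a b => decide (PySem.Str.lower a.2.1 < PySem.Str.lower b.2.1)) x a) []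
          = PySem.List.sorted (g.map (fun t => ((r : Int), t.1, t.2)))
              (fun x => PySem.Str.lower x.2.1) := by
        rw [PySem.List.sorted_eq_foldl_insertBy]
      rw [hs]
      rw [ih (r + g.length) _ (fun z hz => hne z (by simp [hz]))
        (by
          intro y hy
          have hg1 : 1 ≤ (g.length : Int) := by
            have := hne g (by simp)
            have : g.length ≠ 0 := by simpa [List.length_eq_zero_iff] using this
            omega
          rcases List.mem_append.1 hy with hy | hy
          · have := hlt y hy; omega
          · have : y ∈ g.map (fun t => ((r : Int), t.1, t.2)) :=
              (PySem.List.mem_sorted _ _ _ _).1 hy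
            have := hblock y this
            omega)]
      simp

-- a run of equal counts only appends, keeping rank and prev
theorem pvRun_fold : ∀ (g : List (String × String)) (c : String), (∀ t ∈ g, t.2 = c) →
    ∀ (acc : List (Int × String × String)) (r : Int),
    g.foldl pvStepB (acc, r, some c) = (acc ++ g.map (fun t => (r, t.1, t.2)), r, some c) := by
  intro g
  induction g with
  | nil => intro c _ acc r; simp
  | cons t ts ih =>
      intro c hc acc r
      have ht : t.2 = c := hc t (by simp)
      simp only [List.foldl_cons, pvStepB, ht]
      rw [if_neg (by simp)]
      rw [ih c (fun z hz => hc z (List.mem_cons_of_mem _ hz))]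
      simp [← ht]

theorem pvHead_dropWhile {α : Type} (p : α → Bool) :
    ∀ (l : List α) (h : α), (l.dropWhile p).head? = some h → p h = false := by
  intro l
  induction l with
  | nil => intro h hh; simp [List.dropWhile] at hh
  | cons x xs ih =>
      intro h hh
      rw [List.dropWhile_cons] at hh
      by_cases hp : p x = true
      · rw [if_pos hp] at hh; exact ih h hh
      · rw [if_neg hp] at hh
        simp at hh
        subst hh
        simpa using hp

-- the annotate pass produces pvMid of the consecutive runs
theorem pvAnnot : ∀ (n : Nat) (st : List (String × String)), st.length ≤ n →
    ∀ (acc : List (Int × String × String)) (r0 : Int) (prev : Option String),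
    (∀ h ∈ st.head?, prev ≠ some h.2) →
    (st.foldl pvStepB (acc, r0, prev)).1 = acc ++ pvMid (pvRuns st) ((acc.length : Int) + 1) := by
  intro n
  induction n with
  | zero =>
      intro st hst acc r0 prev _
      have : st = [] := List.length_eq_zero_iff.1 (Nat.le_zero.1 hst)
      subst this
      simp [pvRuns, pvMid]
  | succ m ih =>
      intro st hst acc r0 prev hprev
      match st with
      | [] => simp [pvRuns, pvMid]
      | x :: xs =>
          have hx : prev ≠ some x.2 := hprev x (by simp)
          have hstep : (x :: xs).foldl pvStepB (acc, r0, prev)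
              = xs.foldl pvStepB
                  (acc ++ [((acc.length : Int) + 1, x.1, x.2)], (acc.length : Int) + 1, some x.2) := by
            simp only [List.foldl_cons, pvStepB]
            rw [if_pos hx]
          rw [hstep]
          have hsplit : xs.foldl pvStepB
              (acc ++ [((acc.length : Int) + 1, x.1, x.2)], (acc.length : Int) + 1, some x.2)
              = (xs.dropWhile (fun y => y.2 == x.2)).foldl pvStepB
                  ((xs.takeWhile (fun y => y.2 == x.2)).foldl pvStepB
                    (acc ++ [((acc.length : Int) + 1, x.1, x.2)], (acc.length : Int) + 1, some x.2)) := by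
            conv_lhs => rw [← List.takeWhile_append_dropWhile (p := fun y => y.2 == x.2) (l := xs)]
            rw [List.foldl_append]
          rw [hsplit]
          rw [pvRun_fold (xs.takeWhile (fun y => y.2 == x.2)) x.2
            (by intro t ht; simpa using (List.mem_takeWhile_imp ht))
            (acc ++ [((acc.length : Int) + 1, x.1, x.2)]) ((acc.length : Int) + 1)]
          rw [ih (xs.dropWhile (fun y => y.2 == x.2))
            (le_trans (List.length_dropWhile_le _ _) (by simpa using hst))
            _ _ _
            (by
              intro h hh
              have := pvHead_dropWhile (fun y => y.2 == x.2) xs h hh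
              simp only [beq_eq_false_iff_ne, ne_eq] at this
              simpa [eq_comm] using fun e => this e.symm)]
          rw [pvRuns]
          simp only [pvMid, List.length_append, List.length_map, List.length_cons,
            List.length_nil, List.map_cons]
          have harg : ((acc.length + 1 + (xs.takeWhile (fun y => y.2 == x.2)).length : Nat) : Int) + 1
              = ((acc.length : Int) + 1) + ((xs.takeWhile (fun y => y.2 == x.2)).length + 1 : Nat) := by
            push_cast; ring
          rw [harg]
          simp [List.append_assoc]

-- A's loop over the runs computes pvAmid
theorem pvALoop : ∀ (gs : List (List (String × String))) (acc : List (Int × String × String))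
    (r : Int),
    (gs.foldl
      (fun (st : List (Int × String × String) × Int) tuples =>
        let group := PySem.List.sorted (tuples.map (fun t => (st.2, t.1, t.2)))
          (fun x => PySem.Str.lower x.2.1)
        (st.1 ++ group, st.2 + group.length))
      (acc, r)).1 = acc ++ pvAmid gs r := by
  intro gs
  induction gs with
  | nil => intro acc r; simp [pvAmid]
  | cons g gs ih =>
      intro acc r
      simp only [List.foldl_cons]
      rw [ih]
      simp [pvAmid, PySem.List.length_sorted]

-- B's sorted2 with its default reverse unfolds to the insertion fold with pvBt
theorem pvSorted2_eq (xs : List (Int × String × String)) :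
    PySem.List.sorted2 xs (fun t => t.1) (fun t => PySem.Str.lower t.2.1)
      = xs.foldl (fun a x => PySem.List.insertBy pvBt x a) [] := by
  rfl

-- ===== VERDICT (by name: the statement is the Claim_ definition above) =====
theorem get_rankings_for_tuples_spec : Claim_equal_get_rankings_for_tuples := by
  intro st _
  unfold Spec_get_rankings_for_tuples
  unfold get_rankings_for_tuples get_rankings_for_tuples_alt
  have hA := pvALoop (pvRuns st) [] 1
  simp only [List.nil_append] at hA
  rw [hA]
  have hB := pvAnnot st.length st (le_refl _) [] 0 none
    (by intro h _; simp)
  simp only [List.length_nil, Nat.cast_zero, List.nil_append] at hB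
  have hB' : (st.foldl pvStepB ([], 0, none)).1 = pvMid (pvRuns st) 1 := by
    simpa using hB
  show pvAmid (pvRuns st) 1
      = PySem.List.sorted2 (st.foldl pvStepB ([], 0, none)).1
          (fun t => t.1) (fun t => PySem.Str.lower t.2.1)
  rw [hB', pvSorted2_eq]
  have := pvSort_mid (pvRuns st) 1 [] (pvRuns_ne_nil st) (by simp)
  simp only [List.nil_append] at this
  exact this.symm
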